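-- pv_equiv track=rewrite | github.com/ChoiJimin00/Algorithm_study | Python/Dynamic-Programming/BJ_2958.py | get_LCS
-- ===== SOURCE A (Python) =====
-- def get_LCS(w1, w2, w3):
--     dp = [[[0]*len(w3) for _ in range(len(w2))] for _ in range(len(w1))]
--
--     for i in range(1,len(w1)):
--         for j in range(1,len(w2)):
--             for k in range(1,len(w3)):
--                 if w1[i] == w2[j] == w3[k]:
--                     dp[i][j][k] = dp[i-1][j-1][k-1] + 1
--                 else:
--                     dp[i][j][k] = max([dp[i-1][j][k],dp[i][j-1][k],dp[i][j][k-1]])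
--
--     return dp[-1][-1][-1]
-- ===== SOURCE B (Python) =====
-- def get_LCS(w1, w2, w3):
--     memo = {}
--
--     def solve(i, j, k):
--         if i <= 0 or j <= 0 or k <= 0:
--             return 0
--         key = (i, j, k)
--         if key in memo:
--             return memo[key]
--         if w1[i] == w2[j] == w3[k]:
--             res = solve(i - 1, j - 1, k - 1) + 1
--         else:
--             res = max(solve(i - 1, j, k), solve(i, j - 1, k), solve(i, j, k - 1))
--         memo[key] = res
--         return res
--
--     return solve(len(w1) - 1, len(w2) - 1, len(w3) - 1)
-- ===== Notes on version B (the rewrite author's own statement) =====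
-- stated objective: alternative
-- what changed: Replaces the bottom-up triple-loop DP table with top-down memoized recursion over the same recurrence, visiting only reachable states instead of allocating and filling the whole n1*n2*n3 table.
import Mathlib
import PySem

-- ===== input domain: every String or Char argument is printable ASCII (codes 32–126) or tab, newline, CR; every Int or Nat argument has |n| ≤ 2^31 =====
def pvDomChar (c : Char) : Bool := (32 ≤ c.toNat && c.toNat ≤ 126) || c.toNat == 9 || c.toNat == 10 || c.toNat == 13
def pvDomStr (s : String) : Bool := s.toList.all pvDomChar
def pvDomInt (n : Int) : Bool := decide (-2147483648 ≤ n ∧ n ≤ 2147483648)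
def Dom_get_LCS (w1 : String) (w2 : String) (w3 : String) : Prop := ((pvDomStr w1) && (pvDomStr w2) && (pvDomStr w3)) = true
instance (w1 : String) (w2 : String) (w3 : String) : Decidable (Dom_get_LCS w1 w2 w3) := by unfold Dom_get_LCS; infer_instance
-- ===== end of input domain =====

-- B replaces the bottom-up triple-loop DP table with top-down recursion over the same
-- recurrence (memoized in Python; the memo is a pure caching device, so the Lean port is the
-- plain recursion). Return-value equivalence only; neither version mutates its arguments.

-- ===== PORT A =====
-- dp[i][j][k] read; the default 0 is only reached outside Pre_get_LCS (Python: IndexError)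
def pvGet3 (dp : List (List (List Int))) (i j k : Int) : Int :=
  PySem.List.pyGetD (PySem.List.pyGetD (PySem.List.pyGetD dp i []) j []) k 0

-- dp[i][j][k] = v (indices are in range wherever the loops execute this)
def pvSet3 (dp : List (List (List Int))) (i j k : Int) (v : Int) : List (List (List Int)) :=
  PySem.List.pySetD dp i (PySem.List.pySetD (PySem.List.pyGetD dp i []) j
    (PySem.List.pySetD (PySem.List.pyGetD (PySem.List.pyGetD dp i []) j []) k v))

-- the innermost loop body of A
def pvBody (w1 w2 w3 : String) (dp : List (List (List Int))) (i j k : Int) :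
    List (List (List Int)) :=
  if PySem.Str.pyGet? w1 i = PySem.Str.pyGet? w2 j ∧
     PySem.Str.pyGet? w2 j = PySem.Str.pyGet? w3 k then
    pvSet3 dp i j k (pvGet3 dp (i-1) (j-1) (k-1) + 1)
  else
    pvSet3 dp i j k (max (max (pvGet3 dp (i-1) j k) (pvGet3 dp i (j-1) k)) (pvGet3 dp i j (k-1)))

def get_LCS (w1 : String) (w2 : String) (w3 : String) : Int :=
  let dp0 : List (List (List Int)) :=
    (PySem.List.pyRange 0 (PySem.Str.len w1) 1).map (fun _ =>
      (PySem.List.pyRange 0 (PySem.Str.len w2) 1).map (fun _ =>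
        List.replicate (PySem.Str.len w3).toNat (0 : Int)))
  let dp :=
    (PySem.List.pyRange 1 (PySem.Str.len w1) 1).foldl (fun dp i =>
      (PySem.List.pyRange 1 (PySem.Str.len w2) 1).foldl (fun dp j =>
        (PySem.List.pyRange 1 (PySem.Str.len w3) 1).foldl (fun dp k =>
          pvBody w1 w2 w3 dp i j k) dp) dp) dp0
  pvGet3 dp (-1) (-1) (-1)

-- ===== PORT B =====
-- solve(i,j,k) of Source B with its memo dict threaded through; the fuel argument only makes
-- the recursion structural (every call decreases i+j+k, and the driver supplies enough)
def pvSolveM (xs ys zs : List Char) :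
    Nat → Nat → Nat → Nat → PySem.Dict (Nat × Nat × Nat) Int →
    Int × PySem.Dict (Nat × Nat × Nat) Int
  | _, 0, _, _, memo => (0, memo)
  | _, _+1, 0, _, memo => (0, memo)
  | _, _+1, _+1, 0, memo => (0, memo)
  | 0, _+1, _+1, _+1, memo => (0, memo)
  | fuel+1, i+1, j+1, k+1, memo =>
    match PySem.Dict.get? memo (i+1, j+1, k+1) with
    | some v => (v, memo)
    | none =>
      let r :=
        if (xs[i+1]? = ys[j+1]? ∧ ys[j+1]? = zs[k+1]?) then
          let p := pvSolveM xs ys zs fuel i j k memo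
          (p.1 + 1, p.2)
        else
          let p1 := pvSolveM xs ys zs fuel i (j+1) (k+1) memo
          let p2 := pvSolveM xs ys zs fuel (i+1) j (k+1) p1.2
          let p3 := pvSolveM xs ys zs fuel (i+1) (j+1) k p2.2
          (max (max p1.1 p2.1) p3.1, p3.2)
      (r.1, PySem.Dict.insert r.2 (i+1, j+1, k+1) r.1)

def get_LCS_alt (w1 : String) (w2 : String) (w3 : String) : Int :=
  (pvSolveM w1.toList w2.toList w3.toList
    (w1.toList.length + w2.toList.length + w3.toList.length)
    (w1.toList.length - 1) (w2.toList.length - 1) (w3.toList.length - 1)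
    PySem.Dict.empty).1

-- ===== PRECONDITION & SPEC =====
-- Pre_ excludes exactly the inputs where A raises: any empty string makes dp[-1] an IndexError
def Pre_get_LCS (w1 : String) (w2 : String) (w3 : String) : Prop :=
  w1.toList ≠ [] ∧ w2.toList ≠ [] ∧ w3.toList ≠ []
instance (w1 : String) (w2 : String) (w3 : String) : Decidable (Pre_get_LCS w1 w2 w3) := by
  unfold Pre_get_LCS; infer_instance

def pvWitness_get_LCS : String × String × String := ("abca", "bca", "cab")

def Spec_get_LCS (w1 : String) (w2 : String) (w3 : String) (out : Int) : Prop :=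
  out = get_LCS_alt w1 w2 w3
instance (w1 : String) (w2 : String) (w3 : String) (out : Int) :
    Decidable (Spec_get_LCS w1 w2 w3 out) := by unfold Spec_get_LCS; infer_instance

-- ===== CLAIM (what is proved, stated in full; the proofs are below) =====
def Claim_equal_get_LCS : Prop := ∀ (w1 : String) (w2 : String) (w3 : String),
  Dom_get_LCS w1 w2 w3 → Pre_get_LCS w1 w2 w3 → Spec_get_LCS w1 w2 w3 (get_LCS w1 w2 w3)

-- ===== LEMMAS AND PROOFS =====

-- memo-free reference form of Source B's recursion (same fuel device), used to state the
-- table invariant; pvSolveM is proved to compute it below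
def pvSolve (xs ys zs : List Char) : Nat → Nat → Nat → Nat → Int
  | _, 0, _, _ => 0
  | _, _+1, 0, _ => 0
  | _, _+1, _+1, 0 => 0
  | 0, _+1, _+1, _+1 => 0
  | fuel+1, i+1, j+1, k+1 =>
    if (xs[i+1]? = ys[j+1]? ∧ ys[j+1]? = zs[k+1]?) then
      pvSolve xs ys zs fuel i j k + 1
    else
      max (max (pvSolve xs ys zs fuel i (j+1) (k+1)) (pvSolve xs ys zs fuel (i+1) j (k+1)))
          (pvSolve xs ys zs fuel (i+1) (j+1) k)

-- fuel does not matter once it is at least i+j+k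
theorem pvSolve_fuel (xs ys zs : List Char) (f : Nat) :
    ∀ (g i j k : Nat), i + j + k ≤ f → i + j + k ≤ g →
      pvSolve xs ys zs f i j k = pvSolve xs ys zs g i j k := by
  induction f with
  | zero =>
    intro g i j k hf _
    match i, j, k with
    | 0, _, _ => cases g <;> rfl
    | i+1, j, k => exact absurd hf (by omega)
  | succ f ih =>
    intro g i j k hf hg
    match i, j, k with
    | 0, _, _ => cases g <;> rfl
    | _+1, 0, _ => cases g <;> rfl
    | _+1, _+1, 0 => cases g <;> rfl
    | i+1, j+1, k+1 =>
      match g, hg with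
      | g+1, hg =>
        show (if _ then pvSolve xs ys zs f i j k + 1 else _) = _
        rw [show pvSolve xs ys zs f i j k = pvSolve xs ys zs g i j k from
              ih g i j k (by omega) (by omega),
            show pvSolve xs ys zs f i (j+1) (k+1) = pvSolve xs ys zs g i (j+1) (k+1) from
              ih g i (j+1) (k+1) (by omega) (by omega),
            show pvSolve xs ys zs f (i+1) j (k+1) = pvSolve xs ys zs g (i+1) j (k+1) from
              ih g (i+1) j (k+1) (by omega) (by omega),
            show pvSolve xs ys zs f (i+1) (j+1) k = pvSolve xs ys zs g (i+1) (j+1) k from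
              ih g (i+1) (j+1) k (by omega) (by omega)]
        rfl

-- canonical (fuel-saturated) value of the recursion
def pvR (xs ys zs : List Char) (i j k : Nat) : Int :=
  pvSolve xs ys zs (i + j + k) i j k

theorem pvSolve_base (xs ys zs : List Char) (f i j k : Nat)
    (h : i = 0 ∨ j = 0 ∨ k = 0) : pvSolve xs ys zs f i j k = 0 := by
  rcases h with rfl | rfl | rfl
  · cases f <;> rfl
  · cases f <;> cases i <;> rfl
  · cases f <;> cases i <;> cases j <;> rfl

theorem pvR_zero (xs ys zs : List Char) (i j k : Nat)
    (h : i = 0 ∨ j = 0 ∨ k = 0) : pvR xs ys zs i j k = 0 :=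
  pvSolve_base xs ys zs _ i j k h

theorem pvR_succ (xs ys zs : List Char) (i j k : Nat) :
    pvR xs ys zs (i+1) (j+1) (k+1) =
      if (xs[i+1]? = ys[j+1]? ∧ ys[j+1]? = zs[k+1]?) then
        pvR xs ys zs i j k + 1
      else
        max (max (pvR xs ys zs i (j+1) (k+1)) (pvR xs ys zs (i+1) j (k+1)))
            (pvR xs ys zs (i+1) (j+1) k) := by
  unfold pvR
  rw [show (i+1)+(j+1)+(k+1) = (i+j+k+2)+1 from by omega]
  show (if _ then pvSolve xs ys zs (i+j+k+2) i j k + 1 else _) = _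
  rw [pvSolve_fuel xs ys zs (i+j+k+2) (i+j+k) i j k (by omega) (by omega),
      pvSolve_fuel xs ys zs (i+j+k+2) (i+(j+1)+(k+1)) i (j+1) (k+1) (by omega) (by omega),
      pvSolve_fuel xs ys zs (i+j+k+2) ((i+1)+j+(k+1)) (i+1) j (k+1) (by omega) (by omega),
      pvSolve_fuel xs ys zs (i+j+k+2) ((i+1)+(j+1)+k) (i+1) (j+1) k (by omega) (by omega)]

-- a memo all of whose entries hold the recursion's value
def pvMemoOK (xs ys zs : List Char) (m : PySem.Dict (Nat × Nat × Nat) Int) : Prop :=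
  ∀ (p : Nat × Nat × Nat) (v : Int), PySem.Dict.get? m p = some v →
    v = pvR xs ys zs p.1 p.2.1 p.2.2

-- the memoized recursion computes pvR and keeps the memo correct
theorem pvSolveM_correct (xs ys zs : List Char) (f : Nat) :
    ∀ (i j k : Nat) (m : PySem.Dict (Nat × Nat × Nat) Int), i + j + k ≤ f →
      pvMemoOK xs ys zs m →
      (pvSolveM xs ys zs f i j k m).1 = pvR xs ys zs i j k ∧
        pvMemoOK xs ys zs (pvSolveM xs ys zs f i j k m).2 := by
  induction f with
  | zero =>
    intro i j k m hf hm
    match i, j, k with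
    | 0, _, _ => exact ⟨(pvR_zero xs ys zs _ _ _ (by omega)).symm, hm⟩
    | i+1, j, k => exact absurd hf (by omega)
  | succ f ih =>
    intro i j k m hf hm
    match i, j, k with
    | 0, _, _ => exact ⟨(pvR_zero xs ys zs _ _ _ (by omega)).symm, hm⟩
    | _+1, 0, _ => exact ⟨(pvR_zero xs ys zs _ _ _ (by omega)).symm, hm⟩
    | _+1, _+1, 0 => exact ⟨(pvR_zero xs ys zs _ _ _ (by omega)).symm, hm⟩
    | i+1, j+1, k+1 =>
      cases hget : PySem.Dict.get? m (i+1, j+1, k+1) with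
      | some v =>
        simp only [pvSolveM, hget]
        exact ⟨hm (i+1, j+1, k+1) v hget, hm⟩
      | none =>
        simp only [pvSolveM, hget]
        by_cases hc : (xs[i+1]? = ys[j+1]? ∧ ys[j+1]? = zs[k+1]?)
        · obtain ⟨h1, hmok⟩ := ih i j k m (by omega) hm
          simp only [if_pos hc]
          have hval : (pvSolveM xs ys zs f i j k m).1 + 1 =
              pvR xs ys zs (i+1) (j+1) (k+1) := by
            rw [h1, pvR_succ, if_pos hc]
          refine ⟨hval, ?_⟩
          intro q w hq
          rw [PySem.Dict.get?_insert] at hq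
          by_cases hqk : q = (i+1, j+1, k+1)
          · rw [if_pos hqk] at hq
            obtain rfl : w = _ := (Option.some_inj.mp hq).symm
            subst hqk
            exact hval.symm ▸ hval
          · rw [if_neg hqk] at hq
            exact hmok q w hq
        · obtain ⟨h1, hm1⟩ := ih i (j+1) (k+1) m (by omega) hm
          obtain ⟨h2, hm2⟩ := ih (i+1) j (k+1) _ (by omega) hm1
          obtain ⟨h3, hm3⟩ := ih (i+1) (j+1) k _ (by omega) hm2
          simp only [if_neg hc]
          have hval : max (max (pvSolveM xs ys zs f i (j+1) (k+1) m).1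
              (pvSolveM xs ys zs f (i+1) j (k+1) (pvSolveM xs ys zs f i (j+1) (k+1) m).2).1)
              (pvSolveM xs ys zs f (i+1) (j+1) k
                (pvSolveM xs ys zs f (i+1) j (k+1)
                  (pvSolveM xs ys zs f i (j+1) (k+1) m).2).2).1 =
              pvR xs ys zs (i+1) (j+1) (k+1) := by
            rw [h1, h2, h3, pvR_succ, if_neg hc]
          refine ⟨hval, ?_⟩
          intro q w hq
          rw [PySem.Dict.get?_insert] at hq
          by_cases hqk : q = (i+1, j+1, k+1)
          · rw [if_pos hqk] at hq
            obtain rfl : w = _ := (Option.some_inj.mp hq).symm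
            subst hqk
            exact hval.symm ▸ hval
          · rw [if_neg hqk] at hq
            exact hm3 q w hq

-- the empty memo is trivially correct
theorem pvMemoOK_empty (xs ys zs : List Char) :
    pvMemoOK xs ys zs PySem.Dict.empty := by
  intro p v h
  rw [PySem.Dict.get?_empty] at h
  cases h

-- Nat-indexed view of the table reads/writes
def pvG (T : List (List (List Int))) (i j k : Nat) : Int :=
  ((T.getD i []).getD j []).getD k 0

def pvS (T : List (List (List Int))) (i j k : Nat) (v : Int) : List (List (List Int)) :=
  T.set i ((T.getD i []).set j (((T.getD i []).getD j []).set k v))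

def pvShape (T : List (List (List Int))) (L1 L2 L3 : Nat) : Prop :=
  T.length = L1 ∧ ∀ r ∈ T, r.length = L2 ∧ ∀ q ∈ r, q.length = L3

-- value of cell (i',j',k') when the loops have completed exactly the cells
-- lexicographically before (i,j,kn)
def pvTv (a b c : List Char) (i j kn i' j' k' : Nat) : Int :=
  if i' = 0 ∨ j' = 0 ∨ k' = 0 then 0
  else if i' < i ∨ (i' = i ∧ (j' < j ∨ (j' = j ∧ k' < kn))) then pvR a b c i' j' k' else 0

def pvInv (a b c : List Char) (T : List (List (List Int))) (i j kn : Nat) : Prop :=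
  pvShape T a.length b.length c.length ∧
  ∀ i' j' k', i' < a.length → j' < b.length → k' < c.length →
    pvG T i' j' k' = pvTv a b c i j kn i' j' k'

theorem pvGet3_natCast (T : List (List (List Int))) (i j k : Nat) :
    pvGet3 T (i : Int) (j : Int) (k : Int) = pvG T i j k := by
  simp [pvGet3, pvG]

theorem pvSet3_natCast (T : List (List (List Int))) (i j k : Nat) (v : Int) :
    pvSet3 T (i : Int) (j : Int) (k : Int) v = pvS T i j k v := by
  simp [pvSet3, pvS]

theorem pvGetD_set {α : Type} (l : List α) (n m : Nat) (x d : α) (hm : m < l.length) :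
    (l.set n x).getD m d = if n = m then x else l.getD m d := by
  rw [List.getD_eq_getElem _ _ (by simpa using hm), List.getElem_set]
  by_cases h : n = m
  · simp [h]
  · rw [if_neg h, if_neg h, List.getD_eq_getElem l d hm]

theorem pvShape_pvS (T : List (List (List Int))) {L1 L2 L3 : Nat} (i j k : Nat) (v : Int)
    (h : pvShape T L1 L2 L3) (hi : i < L1) (hj : j < L2) :
    pvShape (pvS T i j k v) L1 L2 L3 := by
  obtain ⟨hlen, hmem⟩ := h
  have hiT : i < T.length := by omega
  have hrow : T.getD i [] = T[i] := List.getD_eq_getElem T [] hiT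
  obtain ⟨hTi, hTi2⟩ := hmem T[i] (List.getElem_mem hiT)
  have hjT : j < T[i].length := by omega
  have hcol : T[i].getD j [] = T[i][j] := List.getD_eq_getElem _ [] hjT
  refine ⟨by simpa [pvS] using hlen, ?_⟩
  intro r hr
  rcases List.mem_or_eq_of_mem_set hr with hr | rfl
  · exact hmem r hr
  · refine ⟨by rw [List.length_set, hrow, hTi], ?_⟩
    intro q hq
    rcases List.mem_or_eq_of_mem_set hq with hq | rfl
    · exact hTi2 q (by rwa [hrow] at hq)
    · rw [List.length_set, hrow, hcol]
      exact hTi2 T[i][j] (List.getElem_mem hjT)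

theorem pvG_pvS (T : List (List (List Int))) {L1 L2 L3 : Nat} (h : pvShape T L1 L2 L3)
    (i j k i' j' k' : Nat) (hi : i < L1) (hj : j < L2) (_hk : k < L3)
    (hi' : i' < L1) (hj' : j' < L2) (hk' : k' < L3) (v : Int) :
    pvG (pvS T i j k v) i' j' k' = if i' = i ∧ j' = j ∧ k' = k then v else pvG T i' j' k' := by
  obtain ⟨hlen, hmem⟩ := h
  have hiT : i < T.length := by omega
  have hi'T : i' < T.length := by omega
  have hrow : T.getD i [] = T[i] := List.getD_eq_getElem T [] hiT
  obtain ⟨hTi, hTi2⟩ := hmem T[i] (List.getElem_mem hiT)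
  have hjT : j < T[i].length := by omega
  have hcol : T[i].getD j [] = T[i][j] := List.getD_eq_getElem _ [] hjT
  unfold pvG pvS
  rw [pvGetD_set T i i' _ [] hi'T]
  by_cases hii : i = i'
  · subst hii
    rw [if_pos rfl, hrow,
        pvGetD_set T[i] j j' _ [] (by omega)]
    by_cases hjj : j = j'
    · subst hjj
      rw [if_pos rfl, hcol,
          pvGetD_set T[i][j] k k' v 0 (by rw [hTi2 T[i][j] (List.getElem_mem hjT)]; omega)]
      by_cases hkk : k = k'
      · subst hkk; simp
      · rw [if_neg hkk, if_neg (by tauto)]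
    · rw [if_neg hjj, if_neg (by tauto)]
  · rw [if_neg hii, if_neg (by tauto)]

-- the recursion returns 0 whenever an index is 0
-- a frontier-covered cell's target value is the recursion's value
theorem pvTv_eq_pvR (a b c : List Char) (i j kn i' j' k' : Nat)
    (hdone : i' = 0 ∨ j' = 0 ∨ k' = 0 ∨
      i' < i ∨ (i' = i ∧ (j' < j ∨ (j' = j ∧ k' < kn)))) :
    pvTv a b c i j kn i' j' k' = pvR a b c i' j' k' := by
  unfold pvTv
  by_cases hs : i' = 0 ∨ j' = 0 ∨ k' = 0
  · rw [if_pos hs, pvR_zero a b c _ _ _ hs]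
  · rw [if_neg hs, if_pos (by tauto)]

-- a cell lexicographically before the frontier holds its final (recursion) value
theorem pvInv_done (a b c : List Char) (T : List (List (List Int))) (i j kn : Nat)
    (hInv : pvInv a b c T i j kn) (i' j' k' : Nat)
    (hi' : i' < a.length) (hj' : j' < b.length) (hk' : k' < c.length)
    (hdone : i' = 0 ∨ j' = 0 ∨ k' = 0 ∨
      i' < i ∨ (i' = i ∧ (j' < j ∨ (j' = j ∧ k' < kn)))) :
    pvG T i' j' k' = pvR a b c i' j' k' := by
  rw [hInv.2 i' j' k' hi' hj' hk', pvTv_eq_pvR a b c i j kn i' j' k' hdone]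

-- advancing the k-frontier changes only cell (i,j,k) itself
theorem pvTv_succ_k (a b c : List Char) (i j k i' j' k' : Nat)
    (hne : ¬(i' = i ∧ j' = j ∧ k' = k)) :
    pvTv a b c i j (k+1) i' j' k' = pvTv a b c i j k i' j' k' := by
  unfold pvTv
  by_cases hs : i' = 0 ∨ j' = 0 ∨ k' = 0
  · rw [if_pos hs, if_pos hs]
  · rw [if_neg hs, if_neg hs]
    have he : (i' < i ∨ (i' = i ∧ (j' < j ∨ (j' = j ∧ k' < k+1)))) ↔
        (i' < i ∨ (i' = i ∧ (j' < j ∨ (j' = j ∧ k' < k)))) := by omega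
    simp only [he]

-- one execution of the innermost body advances the frontier by one k-step
theorem pvStep (w1 w2 w3 : String) (T : List (List (List Int))) (i j k : Nat)
    (hi1 : 1 ≤ i) (hi : i < w1.toList.length)
    (hj1 : 1 ≤ j) (hj : j < w2.toList.length)
    (hk1 : 1 ≤ k) (hk : k < w3.toList.length)
    (hInv : pvInv w1.toList w2.toList w3.toList T i j k) :
    pvInv w1.toList w2.toList w3.toList (pvBody w1 w2 w3 T (i : Int) (j : Int) (k : Int)) i j (k+1) := by
  obtain ⟨hsh, hv⟩ := hInv
  have hbody : pvBody w1 w2 w3 T (i : Int) (j : Int) (k : Int) =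
      pvS T i j k (if (w1.toList[i]? = w2.toList[j]? ∧ w2.toList[j]? = w3.toList[k]?) then
          pvG T (i-1) (j-1) (k-1) + 1
        else
          max (max (pvG T (i-1) j k) (pvG T i (j-1) k)) (pvG T i j (k-1))) := by
    unfold pvBody
    rw [show (i : Int) - 1 = ((i-1 : Nat) : Int) from by omega,
        show (j : Int) - 1 = ((j-1 : Nat) : Int) from by omega,
        show (k : Int) - 1 = ((k-1 : Nat) : Int) from by omega]
    simp only [PySem.Str.pyGet?_natCast, pvGet3_natCast, pvSet3_natCast]
    split_ifs with hc <;> rfl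
  rw [hbody]
  refine ⟨pvShape_pvS T i j k _ ⟨hsh.1, hsh.2⟩ (by omega) (by omega), ?_⟩
  intro i' j' k' h1 h2 h3
  rw [pvG_pvS T hsh i j k i' j' k' (by omega) (by omega) (by omega) h1 h2 h3]
  by_cases hcell : i' = i ∧ j' = j ∧ k' = k
  · obtain ⟨rfl, rfl, rfl⟩ := hcell
    rw [if_pos ⟨rfl, rfl, rfl⟩]
    obtain ⟨i₀, rfl⟩ : ∃ t, i' = t + 1 := ⟨i' - 1, by omega⟩
    obtain ⟨j₀, rfl⟩ : ∃ t, j' = t + 1 := ⟨j' - 1, by omega⟩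
    obtain ⟨k₀, rfl⟩ : ∃ t, k' = t + 1 := ⟨k' - 1, by omega⟩
    simp only [Nat.add_sub_cancel]
    have d1 : pvG T i₀ j₀ k₀ = pvR w1.toList w2.toList w3.toList i₀ j₀ k₀ :=
      pvInv_done _ _ _ T _ _ _ ⟨hsh, hv⟩ i₀ j₀ k₀ (by omega) (by omega) (by omega) (by omega)
    have d2 : pvG T i₀ (j₀+1) (k₀+1) = pvR w1.toList w2.toList w3.toList i₀ (j₀+1) (k₀+1) :=
      pvInv_done _ _ _ T _ _ _ ⟨hsh, hv⟩ _ _ _ (by omega) (by omega) (by omega) (by omega)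
    have d3 : pvG T (i₀+1) j₀ (k₀+1) = pvR w1.toList w2.toList w3.toList (i₀+1) j₀ (k₀+1) :=
      pvInv_done _ _ _ T _ _ _ ⟨hsh, hv⟩ _ _ _ (by omega) (by omega) (by omega) (by omega)
    have d4 : pvG T (i₀+1) (j₀+1) k₀ = pvR w1.toList w2.toList w3.toList (i₀+1) (j₀+1) k₀ :=
      pvInv_done _ _ _ T _ _ _ ⟨hsh, hv⟩ _ _ _ (by omega) (by omega) (by omega) (by omega)
    rw [d1, d2, d3, d4,
        pvTv_eq_pvR w1.toList w2.toList w3.toList (i₀+1) (j₀+1) (k₀+1+1) (i₀+1) (j₀+1) (k₀+1)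
          (by omega),
        pvR_succ]
  · rw [if_neg hcell, hv i' j' k' h1 h2 h3,
        pvTv_succ_k w1.toList w2.toList w3.toList i j k i' j' k' hcell]

-- the k-loop: folding the body over range(k0, L3) completes row (i,j)
theorem pvKLoop (w1 w2 w3 : String) (T : List (List (List Int))) (i j k0 : Nat)
    (hi1 : 1 ≤ i) (hi : i < w1.toList.length)
    (hj1 : 1 ≤ j) (hj : j < w2.toList.length)
    (hk1 : 1 ≤ k0) (hk0 : k0 ≤ w3.toList.length)
    (hInv : pvInv w1.toList w2.toList w3.toList T i j k0) :
    pvInv w1.toList w2.toList w3.toList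
      ((PySem.List.pyRange (k0 : Int) (PySem.Str.len w3) 1).foldl
        (fun dp k => pvBody w1 w2 w3 dp (i : Int) (j : Int) k) T) i j w3.toList.length := by
  have main : ∀ (n k0 : Nat) (T : List (List (List Int))), w3.toList.length - k0 = n →
      1 ≤ k0 → k0 ≤ w3.toList.length → pvInv w1.toList w2.toList w3.toList T i j k0 →
      pvInv w1.toList w2.toList w3.toList
        ((PySem.List.pyRange (k0 : Int) (PySem.Str.len w3) 1).foldl
          (fun dp k => pvBody w1 w2 w3 dp (i : Int) (j : Int) k) T) i j w3.toList.length := by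
    intro n
    induction n with
    | zero =>
      intro k0 T hn h1 h2 hInv
      have hk : k0 = w3.toList.length := by omega
      subst hk
      rw [PySem.List.pyRange_one_eq_nil
        (show PySem.Str.len w3 ≤ ((w3.toList.length : Nat) : Int) from by simp [PySem.Str.len])]
      exact hInv
    | succ n ih =>
      intro k0 T hn h1 h2 hInv
      have hlt : (k0 : Int) < PySem.Str.len w3 := by
        simp only [PySem.Str.len]; exact_mod_cast (by omega : k0 < w3.toList.length)
      rw [PySem.List.pyRange_one_cons hlt, List.foldl_cons,
          show (k0 : Int) + 1 = ((k0 + 1 : Nat) : Int) from by push_cast; ring]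
      exact ih (k0+1) _ (by omega) (by omega) (by omega)
        (pvStep w1 w2 w3 T i j k0 hi1 hi hj1 hj h1 (by omega) hInv)
  exact main (w3.toList.length - k0) k0 T rfl hk1 hk0 hInv

-- frontier bookkeeping: finishing the k-loop of column j starts column j+1
theorem pvInv_next_j (a b c : List Char) (T : List (List (List Int))) (i j : Nat)
    (h : pvInv a b c T i j c.length) : pvInv a b c T i (j+1) 1 := by
  refine ⟨h.1, ?_⟩
  intro i' j' k' h1 h2 h3
  rw [h.2 i' j' k' h1 h2 h3]
  unfold pvTv
  by_cases hs : i' = 0 ∨ j' = 0 ∨ k' = 0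
  · rw [if_pos hs, if_pos hs]
  · rw [if_neg hs, if_neg hs]
    have he : (i' < i ∨ (i' = i ∧ (j' < j ∨ (j' = j ∧ k' < c.length)))) ↔
        (i' < i ∨ (i' = i ∧ (j' < j+1 ∨ (j' = j+1 ∧ k' < 1)))) := by omega
    simp only [he]

-- frontier bookkeeping: finishing row i starts row i+1
theorem pvInv_next_i (a b c : List Char) (T : List (List (List Int))) (i : Nat)
    (h : pvInv a b c T i b.length 1) : pvInv a b c T (i+1) 1 1 := by
  refine ⟨h.1, ?_⟩
  intro i' j' k' h1 h2 h3
  rw [h.2 i' j' k' h1 h2 h3]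
  unfold pvTv
  by_cases hs : i' = 0 ∨ j' = 0 ∨ k' = 0
  · rw [if_pos hs, if_pos hs]
  · rw [if_neg hs, if_neg hs]
    have he : (i' < i ∨ (i' = i ∧ (j' < b.length ∨ (j' = b.length ∧ k' < 1)))) ↔
        (i' < i+1 ∨ (i' = i+1 ∧ (j' < 1 ∨ (j' = 1 ∧ k' < 1)))) := by omega
    simp only [he]

theorem pvJLoop (w1 w2 w3 : String) (T : List (List (List Int))) (i j0 : Nat)
    (hi1 : 1 ≤ i) (hi : i < w1.toList.length)
    (hj1 : 1 ≤ j0) (hj0 : j0 ≤ w2.toList.length) (h3 : 1 ≤ w3.toList.length)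
    (hInv : pvInv w1.toList w2.toList w3.toList T i j0 1) :
    pvInv w1.toList w2.toList w3.toList
      ((PySem.List.pyRange (j0 : Int) (PySem.Str.len w2) 1).foldl
        (fun dp j => (PySem.List.pyRange 1 (PySem.Str.len w3) 1).foldl
          (fun dp k => pvBody w1 w2 w3 dp (i : Int) j k) dp) T) i w2.toList.length 1 := by
  have main : ∀ (n j0 : Nat) (T : List (List (List Int))), w2.toList.length - j0 = n →
      1 ≤ j0 → j0 ≤ w2.toList.length → pvInv w1.toList w2.toList w3.toList T i j0 1 →
      pvInv w1.toList w2.toList w3.toList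
        ((PySem.List.pyRange (j0 : Int) (PySem.Str.len w2) 1).foldl
          (fun dp j => (PySem.List.pyRange 1 (PySem.Str.len w3) 1).foldl
            (fun dp k => pvBody w1 w2 w3 dp (i : Int) j k) dp) T) i w2.toList.length 1 := by
    intro n
    induction n with
    | zero =>
      intro j0 T hn h1 h2 hInv
      have hj : j0 = w2.toList.length := by omega
      subst hj
      rw [PySem.List.pyRange_one_eq_nil
        (show PySem.Str.len w2 ≤ ((w2.toList.length : Nat) : Int) from by simp [PySem.Str.len])]
      exact hInv
    | succ n ih =>
      intro j0 T hn h1 h2 hInv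
      have hlt : (j0 : Int) < PySem.Str.len w2 := by
        simp only [PySem.Str.len]; exact_mod_cast (by omega : j0 < w2.toList.length)
      rw [PySem.List.pyRange_one_cons hlt, List.foldl_cons,
          show (j0 : Int) + 1 = ((j0 + 1 : Nat) : Int) from by push_cast; ring]
      have hrow := pvKLoop w1 w2 w3 T i j0 1 hi1 hi h1 (by omega) le_rfl h3 hInv
      simp only [Nat.cast_one] at hrow
      exact ih (j0+1) _ (by omega) (by omega) (by omega)
        (pvInv_next_j w1.toList w2.toList w3.toList _ i j0 hrow)
  exact main (w2.toList.length - j0) j0 T rfl hj1 hj0 hInv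

theorem pvILoop (w1 w2 w3 : String) (T : List (List (List Int))) (i0 : Nat)
    (hi1 : 1 ≤ i0) (hi0 : i0 ≤ w1.toList.length)
    (h2 : 1 ≤ w2.toList.length) (h3 : 1 ≤ w3.toList.length)
    (hInv : pvInv w1.toList w2.toList w3.toList T i0 1 1) :
    pvInv w1.toList w2.toList w3.toList
      ((PySem.List.pyRange (i0 : Int) (PySem.Str.len w1) 1).foldl
        (fun dp i => (PySem.List.pyRange 1 (PySem.Str.len w2) 1).foldl
          (fun dp j => (PySem.List.pyRange 1 (PySem.Str.len w3) 1).foldl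
            (fun dp k => pvBody w1 w2 w3 dp i j k) dp) dp) T) w1.toList.length 1 1 := by
  have main : ∀ (n i0 : Nat) (T : List (List (List Int))), w1.toList.length - i0 = n →
      1 ≤ i0 → i0 ≤ w1.toList.length → pvInv w1.toList w2.toList w3.toList T i0 1 1 →
      pvInv w1.toList w2.toList w3.toList
        ((PySem.List.pyRange (i0 : Int) (PySem.Str.len w1) 1).foldl
          (fun dp i => (PySem.List.pyRange 1 (PySem.Str.len w2) 1).foldl
            (fun dp j => (PySem.List.pyRange 1 (PySem.Str.len w3) 1).foldl
              (fun dp k => pvBody w1 w2 w3 dp i j k) dp) dp) T) w1.toList.length 1 1 := by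
    intro n
    induction n with
    | zero =>
      intro i0 T hn h1 h2 hInv
      have hieq : i0 = w1.toList.length := by omega
      subst hieq
      rw [PySem.List.pyRange_one_eq_nil
        (show PySem.Str.len w1 ≤ ((w1.toList.length : Nat) : Int) from by simp [PySem.Str.len])]
      exact hInv
    | succ n ih =>
      intro i0 T hn h1 hb2 hInv
      have hlt : (i0 : Int) < PySem.Str.len w1 := by
        simp only [PySem.Str.len]; exact_mod_cast (by omega : i0 < w1.toList.length)
      rw [PySem.List.pyRange_one_cons hlt, List.foldl_cons,
          show (i0 : Int) + 1 = ((i0 + 1 : Nat) : Int) from by push_cast; ring]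
      have hrow := pvJLoop w1 w2 w3 T i0 1 h1 (by omega) le_rfl h2 h3 hInv
      simp only [Nat.cast_one] at hrow
      exact ih (i0+1) _ (by omega) (by omega) (by omega)
        (pvInv_next_i w1.toList w2.toList w3.toList _ i0 hrow)
  exact main (w1.toList.length - i0) i0 T rfl hi1 hi0 hInv

-- xs[-1] written with getD (used once, to read dp[-1][-1][-1] level by level)
theorem pvNeg1 {α : Type} (xs : List α) (d : α) (hne : xs ≠ []) :
    PySem.List.pyGetD xs (-1) d = xs.getD (xs.length - 1) d := by
  have hlen : 0 < xs.length := List.length_pos_iff.mpr hne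
  rw [PySem.List.pyGetD_neg_ofNat xs 1 d (by omega) (by omega),
      List.getD_eq_getElem xs d (by omega)]

-- the initial all-zero table satisfies the invariant at frontier (1,1,1)
theorem pvInit (w1 w2 w3 : String) :
    pvInv w1.toList w2.toList w3.toList
      ((PySem.List.pyRange 0 (PySem.Str.len w1) 1).map (fun _ =>
        (PySem.List.pyRange 0 (PySem.Str.len w2) 1).map (fun _ =>
          List.replicate (PySem.Str.len w3).toNat (0 : Int)))) 1 1 1 := by
  constructor
  · refine ⟨by simp [PySem.List.length_pyRange_one, PySem.Str.len], ?_⟩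
    intro r hr
    simp only [List.mem_map] at hr
    obtain ⟨x, -, rfl⟩ := hr
    refine ⟨by simp [PySem.List.length_pyRange_one, PySem.Str.len], ?_⟩
    intro q hq
    simp only [List.mem_map] at hq
    obtain ⟨y, -, rfl⟩ := hq
    simp [PySem.Str.len]
  · intro i' j' k' h1 h2 h3
    have hT0 : (PySem.List.pyRange 0 (PySem.Str.len w1) 1).map (fun _ =>
        (PySem.List.pyRange 0 (PySem.Str.len w2) 1).map (fun _ =>
          List.replicate (PySem.Str.len w3).toNat (0 : Int))) =
        List.replicate w1.toList.length (List.replicate w2.toList.length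
          (List.replicate w3.toList.length (0 : Int))) := by
      simp [List.map_const', PySem.List.length_pyRange_one, PySem.Str.len]
    rw [hT0]
    unfold pvG
    rw [List.getD_eq_getElem (List.replicate w1.toList.length (List.replicate w2.toList.length
          (List.replicate w3.toList.length (0 : Int)))) [] (by simpa using h1),
        List.getElem_replicate,
        List.getD_eq_getElem (List.replicate w2.toList.length
          (List.replicate w3.toList.length (0 : Int))) [] (by simpa using h2),
        List.getElem_replicate,
        List.getD_eq_getElem (List.replicate w3.toList.length (0 : Int)) 0
          (by simpa using h3),
        List.getElem_replicate]
    unfold pvTv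
    by_cases hs : i' = 0 ∨ j' = 0 ∨ k' = 0
    · rw [if_pos hs]
    · rw [if_neg hs,
          if_neg (show ¬(i' < 1 ∨ (i' = 1 ∧ (j' < 1 ∨ (j' = 1 ∧ k' < 1)))) from by omega)]

-- reading dp[-1][-1][-1] of a completed table gives the recursion's answer
theorem pvFinal (w1 w2 w3 : String) (T : List (List (List Int)))
    (h1 : 1 ≤ w1.toList.length) (h2 : 1 ≤ w2.toList.length) (h3 : 1 ≤ w3.toList.length)
    (hfin : pvInv w1.toList w2.toList w3.toList T w1.toList.length 1 1) :
    pvGet3 T (-1) (-1) (-1) =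
      (pvSolveM w1.toList w2.toList w3.toList
        (w1.toList.length + w2.toList.length + w3.toList.length)
        (w1.toList.length - 1) (w2.toList.length - 1) (w3.toList.length - 1)
        PySem.Dict.empty).1 := by
  obtain ⟨⟨hlen, hmem⟩, -⟩ := id hfin
  unfold pvGet3
  rw [pvNeg1 T [] (by rw [← List.length_pos_iff]; omega), hlen]
  obtain ⟨hrL, hrq⟩ := hmem (T.getD (w1.toList.length - 1) [])
    (by rw [List.getD_eq_getElem T [] (by omega)]; exact List.getElem_mem _)
  rw [pvNeg1 (T.getD (w1.toList.length - 1) []) []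
        (by rw [← List.length_pos_iff, hrL]; omega), hrL]
  have hqL := hrq ((T.getD (w1.toList.length - 1) []).getD (w2.toList.length - 1) [])
    (by rw [List.getD_eq_getElem (T.getD (w1.toList.length - 1) []) []
          (by rw [hrL]; omega)]
        exact List.getElem_mem _)
  rw [pvNeg1 ((T.getD (w1.toList.length - 1) []).getD (w2.toList.length - 1) []) 0
        (by rw [← List.length_pos_iff, hqL]; omega), hqL]
  have hfinal := pvInv_done _ _ _ T _ _ _ hfin
    (w1.toList.length - 1) (w2.toList.length - 1) (w3.toList.length - 1)
    (by omega) (by omega) (by omega) (by omega)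
  rw [show (((T.getD (w1.toList.length - 1) []).getD (w2.toList.length - 1) []).getD
        (w3.toList.length - 1) 0) = pvG T (w1.toList.length - 1) (w2.toList.length - 1)
        (w3.toList.length - 1) from rfl,
      hfinal]
  exact ((pvSolveM_correct w1.toList w2.toList w3.toList _ _ _ _ _ (by omega)
    (pvMemoOK_empty w1.toList w2.toList w3.toList)).1).symm

-- ===== VERDICT (by name: the statement is the Claim_ definition above) =====
theorem get_LCS_spec : Claim_equal_get_LCS := by
  intro w1 w2 w3 _ hpre
  obtain ⟨h1, h2, h3⟩ := hpre
  have L1 : 1 ≤ w1.toList.length := List.length_pos_iff.mpr h1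
  have L2 : 1 ≤ w2.toList.length := List.length_pos_iff.mpr h2
  have L3 : 1 ≤ w3.toList.length := List.length_pos_iff.mpr h3
  simp only [Spec_get_LCS, get_LCS, get_LCS_alt]
  refine pvFinal w1 w2 w3 _ L1 L2 L3 ?_
  have h := pvILoop w1 w2 w3 _ 1 le_rfl L1 L2 L3 (pvInit w1 w2 w3)
  rwa [Nat.cast_one] at h
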